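-- pv_equiv track=rewrite | github.com/Nicolaspwilde/Holocron | # Take two numbers as input from the use.py | find_number_in_list
-- ===== SOURCE A (Python) =====
-- def find_number_in_list(numbers, target):
--     """
--     Find the number of occurrences of a target number in a list and return the total positions checked and first occurrence position.
--     :param numbers: List of numbers (as strings) to search in."""
--     position = 0
--     occurrences = 0
--     first_occurrence = -1
--     # Iterate through the list using a while loop
--     while position < len(numbers):
--         if numbers[position] == target:
--             occurrences += 1
--             if first_occurrence == -1:
--                 first_occurrence = position + 1
--         position += 1  # always increment
--
--     return occurrences, position,first_occurrence  # position will be len(numbers)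
-- ===== SOURCE B (Python) =====
-- def find_number_in_list(numbers, target):
--     occurrences = numbers.count(target)
--     first_occurrence = numbers.index(target) + 1 if occurrences else -1
--     return occurrences, len(numbers), first_occurrence
-- ===== Notes on version B (the rewrite author's own statement) =====
-- stated objective: idiomatic
-- what changed: Replaces the manual indexed while-loop that accumulates three counters in one pass with separate standard-library scans: list.count for occurrences, len for positions checked, and list.index (+1, guarded by presence) for the first occurrence.
import Mathlib
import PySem

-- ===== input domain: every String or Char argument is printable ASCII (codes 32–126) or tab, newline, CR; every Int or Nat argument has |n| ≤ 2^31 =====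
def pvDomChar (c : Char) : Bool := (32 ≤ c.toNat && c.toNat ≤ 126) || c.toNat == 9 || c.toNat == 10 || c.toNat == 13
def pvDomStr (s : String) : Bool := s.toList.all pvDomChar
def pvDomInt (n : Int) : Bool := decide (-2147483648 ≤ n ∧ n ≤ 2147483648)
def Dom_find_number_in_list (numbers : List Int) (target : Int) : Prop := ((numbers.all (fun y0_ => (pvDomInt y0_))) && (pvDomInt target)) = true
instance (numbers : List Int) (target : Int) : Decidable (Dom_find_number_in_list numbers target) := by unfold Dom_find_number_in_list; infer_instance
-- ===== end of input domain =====

-- B replaces A's single indexed while-loop by separate library scans (count, len, index+1 with a -1 sentinel); same O(n) asymptotics, idiomatic and measurably faster (C-level builtins vs an interpreted loop).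


-- ===== PORT A =====
-- while-loop of A: walk the list keeping (position, occurrences, first_occurrence)
def findLoopA (rest : List Int) (target : Int) (pos occ fo : Int) : Int × Int × Int :=
  match rest with
  | [] => (occ, pos, fo)
  | x :: xs =>
    if x = target then
      findLoopA xs target (pos + 1) (occ + 1) (if fo = -1 then pos + 1 else fo)
    else
      findLoopA xs target (pos + 1) occ fo

def find_number_in_list (numbers : List Int) (target : Int) : Int × Int × Int :=
  findLoopA numbers target 0 0 (-1)

-- ===== PORT B =====
def find_number_in_list_alt (numbers : List Int) (target : Int) : Int × Int × Int :=
  let occurrences : Int := PySem.List.count numbers target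
  let first_occurrence : Int :=
    if occurrences ≠ 0 then ((PySem.List.index? numbers target).getD 0 : Int) + 1 else -1
  (occurrences, numbers.length, first_occurrence)

-- ===== PRECONDITION & SPEC =====
def Spec_find_number_in_list (numbers : List Int) (target : Int) (out : Int × Int × Int) : Prop := out = find_number_in_list_alt numbers target
instance (numbers : List Int) (target : Int) (out : Int × Int × Int) : Decidable (Spec_find_number_in_list numbers target out) := by unfold Spec_find_number_in_list; infer_instance

-- ===== CLAIM (what is proved, stated in full; the proofs are below) =====
def Claim_equal_find_number_in_list : Prop := ∀ (numbers : List Int) (target : Int), Dom_find_number_in_list numbers target → Spec_find_number_in_list numbers target (find_number_in_list numbers target)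

-- ===== LEMMAS AND PROOFS =====
-- once the first occurrence is fixed (fo ≠ -1), the loop only adds the remaining count
theorem findLoopA_found (target : Int) : ∀ (xs : List Int) (pos occ fo : Int), fo ≠ -1 →
    findLoopA xs target pos occ fo = (occ + (PySem.List.count xs target : Int), pos + xs.length, fo) := by
  intro xs
  induction xs with
  | nil => intro pos occ fo h; simp [findLoopA, PySem.List.count_eq]
  | cons x xs ih =>
    intro pos occ fo h
    by_cases hx : x = target
    · rw [findLoopA, if_pos hx, if_neg h, ih _ _ _ h]
      subst hx
      simp only [PySem.List.count_eq, List.count_cons_self, List.length_cons]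
      refine Prod.ext ?_ (Prod.ext ?_ rfl) <;> simp <;> ring
    · rw [findLoopA, if_neg hx, ih _ _ _ h]
      simp only [PySem.List.count_eq, List.count_cons_of_ne (by simpa using hx), List.length_cons]
      refine Prod.ext rfl (Prod.ext ?_ rfl)
      simp; ring

-- the searching phase (pos ≥ 0 as in A, where pos counts up from 0)
theorem findLoopA_searching (target : Int) : ∀ (xs : List Int) (pos : Int), 0 ≤ pos →
    findLoopA xs target pos 0 (-1) =
      ((PySem.List.count xs target : Int), pos + xs.length,
        match PySem.List.index? xs target with
        | some k => pos + 1 + (k : Int)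
        | none => (-1 : Int)) := by
  intro xs
  induction xs with
  | nil => intro pos _; simp [findLoopA, PySem.List.count_eq, PySem.List.index?]
  | cons x xs ih =>
    intro pos hpos
    by_cases hx : x = target
    · rw [findLoopA, if_pos hx, if_pos rfl,
        findLoopA_found target xs (pos + 1) (0 + 1) (pos + 1) (by omega)]
      subst hx
      rw [PySem.List.index?_cons_self]
      simp only [PySem.List.count_eq, List.count_cons_self, List.length_cons]
      refine Prod.ext ?_ (Prod.ext ?_ ?_) <;> simp <;> ring
    · rw [findLoopA, if_neg hx, ih (pos + 1) (by omega),
        PySem.List.index?_cons_of_ne xs hx]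
      simp only [PySem.List.count_eq, List.count_cons_of_ne (by simpa using hx), List.length_cons]
      refine Prod.ext rfl (Prod.ext ?_ ?_)
      · simp; ring
      · cases h : PySem.List.index? xs target with
        | none => simp
        | some k => simp [Option.map]; push_cast; ring

-- ===== VERDICT (by name: the statement is the Claim_ definition above) =====
theorem find_number_in_list_spec : Claim_equal_find_number_in_list := by
  intro numbers target _
  show find_number_in_list numbers target = find_number_in_list_alt numbers target
  unfold find_number_in_list find_number_in_list_alt
  rw [findLoopA_searching target numbers 0 le_rfl]
  cases h : PySem.List.index? numbers target with
  | none =>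
    have hmem : target ∉ numbers := (PySem.List.index?_eq_none_iff _ _).mp h
    have hc : List.count target numbers = 0 := List.count_eq_zero.mpr hmem
    simp [PySem.List.count_eq, hc]
  | some k =>
    have hmem : target ∈ numbers :=
      (PySem.List.index?_isSome_iff numbers target).mp (by rw [h]; rfl)
    have hc : List.count target numbers ≠ 0 := by
      simpa [List.count_eq_zero] using hmem
    simp only [Option.getD_some]
    simp [PySem.List.count_eq, hc]
    ring
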